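-- pv_equiv track=rewrite | github.com/BruceZhou95/Interview_code | 48_数字序列中某一位的数字.py | Wine
-- ===== SOURCE A (Python) =====
-- def Wine(n):
-- 	count=0 # 记录喝了多少就
--
-- 	while n>=3:
-- 		n-=3
-- 		n+=1
-- 		count+=3
-- 		if  n<3:
-- 			count+=n
-- 	return count
-- ===== SOURCE B (Python) =====
-- def Wine(n):
--     # Closed form: the loop adds 3 per step (each step lowers n by 2) plus the
--     # final remainder (1 or 2), which totals (3*n - 1) // 2 for n >= 3.
--     return 0 if n < 3 else (3 * n - 1) // 2
-- ===== Notes on version B (the rewrite author's own statement) =====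
-- stated objective: faster
-- what changed: Replaced the decrement-by-2 loop with the closed-form formula (3*n-1)//2 (0 for n<3).
import Mathlib
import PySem

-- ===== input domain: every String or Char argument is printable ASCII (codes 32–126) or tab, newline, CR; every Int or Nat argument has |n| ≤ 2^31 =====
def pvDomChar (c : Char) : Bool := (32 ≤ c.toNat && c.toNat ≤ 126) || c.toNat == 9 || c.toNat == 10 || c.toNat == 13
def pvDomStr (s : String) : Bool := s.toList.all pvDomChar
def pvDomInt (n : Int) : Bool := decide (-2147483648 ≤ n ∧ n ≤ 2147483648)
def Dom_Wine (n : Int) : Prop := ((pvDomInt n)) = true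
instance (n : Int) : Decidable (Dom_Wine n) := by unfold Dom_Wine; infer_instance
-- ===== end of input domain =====

-- B replaces A's decrement-by-2 loop with the closed-form (3*n-1)//2 (0 for n < 3); objective: faster (O(1) vs O(n)).

-- ===== PORT A =====
-- A's while loop: while n >= 3: n -= 3; n += 1; count += 3; if n < 3: count += n
def WineLoop (n count : Int) : Int :=
  if h : n ≥ 3 then
    let n' := n - 3 + 1
    let count' := count + 3
    WineLoop n' (if n' < 3 then count' + n' else count')
  else count
termination_by n.toNat
decreasing_by omega

def Wine (n : Int) : Int := WineLoop n 0

-- ===== PORT B =====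
def Wine_alt (n : Int) : Int :=
  if n < 3 then 0 else PySem.Int.floordiv (3 * n - 1) 2

-- ===== PRECONDITION & SPEC =====
def Spec_Wine (n : Int) (out : Int) : Prop := out = Wine_alt n
instance (n : Int) (out : Int) : Decidable (Spec_Wine n out) := by unfold Spec_Wine; infer_instance

-- ===== CLAIM (what is proved, stated in full; the proofs are below) =====
def Claim_equal_Wine : Prop := ∀ (n : Int), Dom_Wine n → Spec_Wine n (Wine n)

-- ===== LEMMAS AND PROOFS =====
theorem WineLoop_closed (n count : Int) :
    WineLoop n count = count + (if n < 3 then 0 else PySem.Int.floordiv (3 * n - 1) 2) := by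
  rw [WineLoop.eq_def]
  by_cases h : n ≥ 3
  · simp only [h, dite_true]
    rw [WineLoop_closed (n - 3 + 1)]
    simp only [PySem.Int.floordiv_eq_ediv_of_pos (by omega : (0:Int) < 2)]
    split_ifs <;> omega
  · simp only [h, dite_false]
    rw [if_pos (by omega : n < 3)]
    omega
termination_by n.toNat
decreasing_by omega

-- ===== VERDICT (by name: the statement is the Claim_ definition above) =====
theorem Wine_spec : Claim_equal_Wine := by
  intro n _
  unfold Spec_Wine Wine Wine_alt
  rw [WineLoop_closed]
  omega
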